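-- pv_equiv track=rewrite | github.com/Krityaan-Thapar/Competitive-daily-solutions | GFG/Search in a row-wise sorted matrix/Solution.py | searchRowMatrix
-- ===== SOURCE A (Python) =====
-- def searchRowMatrix(mat, x):
--     r, c = len(mat), len(mat[0])
--     for i in range(r):
--         lo, hi = 0, c - 1
--         while lo <= hi:
--             j = (lo + hi) // 2
--
--             if mat[i][j] == x:
--                 return True
--             elif x < mat[i][j]:
--                 hi = j - 1
--             else:
--                 lo = j + 1
--     return False
-- ===== SOURCE B (Python) =====
-- def searchRowMatrix(mat, x):
--     r, c = len(mat), len(mat[0])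
--
--     def found(seg):
--         if not seg:
--             return False
--         m = (len(seg) - 1) // 2
--         if seg[m] == x:
--             return True
--         if x < seg[m]:
--             return found(seg[:m])
--         return found(seg[m + 1:])
--
--     for i in range(r):
--         if found(mat[i][:c]):
--             return True
--     return False
-- ===== Notes on version B (the rewrite author's own statement) =====
-- stated objective: alternative
-- what changed: Replaces A's iterative while-loop binary search over Int index bounds lo/hi (derived from c) with a recursive divide-and-conquer on list slices seg[:m]/seg[m+1:], and searches each row's first-c-element slice, removing all index arithmetic.
-- outside the precondition, e.g. on searchRowMatrix([[0, 0, 0], [2, 1]], 1): A returns True, B returns False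
import Mathlib
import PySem

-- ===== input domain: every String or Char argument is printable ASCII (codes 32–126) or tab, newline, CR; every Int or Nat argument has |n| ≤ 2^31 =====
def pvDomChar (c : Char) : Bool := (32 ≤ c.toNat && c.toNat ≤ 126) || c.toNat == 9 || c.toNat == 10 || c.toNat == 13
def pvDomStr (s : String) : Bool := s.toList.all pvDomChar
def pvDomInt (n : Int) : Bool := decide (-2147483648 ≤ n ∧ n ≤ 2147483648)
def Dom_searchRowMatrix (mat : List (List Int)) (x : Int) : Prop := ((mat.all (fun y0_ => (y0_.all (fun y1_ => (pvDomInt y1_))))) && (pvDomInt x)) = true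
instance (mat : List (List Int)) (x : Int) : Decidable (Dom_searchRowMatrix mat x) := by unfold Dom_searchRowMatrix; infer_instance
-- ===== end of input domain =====

-- B replaces A's index-arithmetic while-loop binary search by a recursive divide-and-conquer on list slices (same probe sequence, different decomposition).


-- ===== PORT A =====
-- the inner while-loop of A: binary search between Int indices lo and hi (inclusive)
def pyBisect (row : List Int) (x : Int) (lo hi : Int) : Bool :=
  if h : lo ≤ hi then
    let j := PySem.Int.floordiv (lo + hi) 2
    match PySem.List.pyGet? row j with
    | none => false   -- Python raises IndexError here (outside Pre_)
    | some v =>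
      if v = x then true
      else if x < v then pyBisect row x lo (j - 1)
      else pyBisect row x (j + 1) hi
  else false
termination_by (hi + 1 - lo).toNat
decreasing_by
  · have := PySem.Int.floordiv_two_mid_bounds h
    omega
  · have := PySem.Int.floordiv_two_mid_bounds h
    omega

-- the outer 'for i in range(r)' loop with early return
def searchGoA (c : Nat) (x : Int) : List (List Int) → Bool
  | [] => false
  | row :: rest => if pyBisect row x 0 ((c : Int) - 1) then true else searchGoA c x rest

def searchRowMatrix (mat : List (List Int)) (x : Int) : Bool :=
  match PySem.List.pyGet? mat 0 with
  | none => false      -- len(mat[0]) raises IndexError on empty mat (outside Pre_)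
  | some row0 => searchGoA row0.length x mat

-- ===== PORT B =====
-- B's helper found(seg): recursive search splitting the segment at its midpoint;
-- seg[:m] / seg[m+1:] are ported as List.take / List.drop (exact for these nonnegative bounds)
def foundB (x : Int) (seg : List Int) : Bool :=
  if hne : seg = [] then false
  else
    let m := (seg.length - 1) / 2
    match PySem.List.pyGet? seg (m : Int) with
    | none => false   -- unreachable: 0 ≤ m < seg.length
    | some v =>
      if v = x then true
      else if x < v then foundB x (seg.take m)
      else foundB x (seg.drop (m + 1))
termination_by seg.length
decreasing_by
  · have h0 : seg.length ≠ 0 := fun h0 => hne (List.eq_nil_of_length_eq_zero h0)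
    simp only [List.length_take]; omega
  · have h0 : seg.length ≠ 0 := fun h0 => hne (List.eq_nil_of_length_eq_zero h0)
    simp only [List.length_drop]; omega

-- B's outer 'for i in range(r)' loop with early return; mat[i][:c] ported as List.take c
def searchGoB (c : Nat) (x : Int) : List (List Int) → Bool
  | [] => false
  | row :: rest => if foundB x (row.take c) then true else searchGoB c x rest

def searchRowMatrix_alt (mat : List (List Int)) (x : Int) : Bool :=
  match PySem.List.pyGet? mat 0 with
  | none => false      -- B also computes c = len(mat[0]), raising IndexError on empty mat
  | some row0 => searchGoB row0.length x mat

-- ===== PRECONDITION & SPEC =====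
-- Pre_ excludes the empty matrix (A raises IndexError on mat[0]) and matrices with a row shorter
-- than the first row: on those A's binary search indexes such a row with bounds taken from
-- len(mat[0]) and, depending on the probe path, raises IndexError mid-search or returns a value
-- that is an accident of which out-of-range indices its probes happened to avoid.
def Pre_searchRowMatrix (mat : List (List Int)) (x : Int) : Prop :=
  mat ≠ [] ∧ ∀ row ∈ mat, (mat.headD []).length ≤ row.length
instance (mat : List (List Int)) (x : Int) : Decidable (Pre_searchRowMatrix mat x) := by
  unfold Pre_searchRowMatrix; infer_instance

def pvWitness_searchRowMatrix : List (List Int) × Int := ([[1, 3], [2, 4]], 3)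

def Spec_searchRowMatrix (mat : List (List Int)) (x : Int) (out : Bool) : Prop := out = searchRowMatrix_alt mat x
instance (mat : List (List Int)) (x : Int) (out : Bool) : Decidable (Spec_searchRowMatrix mat x out) := by unfold Spec_searchRowMatrix; infer_instance

-- ===== CLAIM (what is proved, stated in full; the proofs are below) =====
def Claim_equal_searchRowMatrix : Prop := ∀ (mat : List (List Int)) (x : Int), Dom_searchRowMatrix mat x → Pre_searchRowMatrix mat x → Spec_searchRowMatrix mat x (searchRowMatrix mat x)

-- ===== LEMMAS AND PROOFS =====

-- A's loop at state (lo, hi) computes exactly B's found on the segment row[lo : hi+1],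
-- for ANY row contents, as long as the bounds stay inside the row.
theorem pyBisect_eq_foundB (row : List Int) (x : Int) :
    ∀ (lo hi : Int), 0 ≤ lo → lo ≤ hi + 1 → hi < (row.length : Int) →
    pyBisect row x lo hi = foundB x ((row.drop lo.toNat).take (hi + 1 - lo).toNat) := by
  intro lo hi
  induction hn : (hi + 1 - lo).toNat using Nat.strong_induction_on generalizing lo hi with
  | _ n ih =>
  intro hlo hlohi hhi
  subst hn
  rw [pyBisect]
  by_cases h : lo ≤ hi
  · simp only [h, dif_pos]
    obtain ⟨hjlo, hjhi⟩ := PySem.Int.floordiv_two_mid_bounds h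
    rw [PySem.Int.floordiv_eq_ediv_of_pos (by omega : (0:Int) < 2)] at *
    set j := (lo + hi) / 2 with hj
    have hj0 : 0 ≤ j := le_trans hlo hjlo
    have hjlen : j < (row.length : Int) := lt_of_le_of_lt hjhi hhi
    have hjn : j.toNat < row.length := by omega
    set seg := (row.drop lo.toNat).take (hi + 1 - lo).toNat with hseg
    have hseglen : seg.length = (hi + 1 - lo).toNat := by
      simp only [hseg, List.length_take, List.length_drop]; omega
    have hsegne : seg ≠ [] := by
      intro h0
      have := congrArg List.length h0
      simp only [hseglen] at this
      simp at this; omega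
    have hm : (seg.length - 1) / 2 = j.toNat - lo.toNat := by
      rw [hseglen]; omega
    have hmlt : (seg.length - 1) / 2 < seg.length := by rw [hseglen]; omega
    have hsegm : ∀ (i : Nat) (hil : i < seg.length), i = j.toNat - lo.toNat →
        seg[i]'hil = row[j.toNat]'hjn := by
      intro i hil hie
      simp only [hseg, List.getElem_take, List.getElem_drop]
      congr 1; omega
    rw [foundB]
    simp only [hsegne, dif_neg, not_false_iff]
    rw [PySem.List.pyGet?_eq_some_getElem seg (by positivity) (by exact_mod_cast hmlt),
        PySem.List.pyGet?_eq_some_getElem row hj0 hjlen]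
    simp only [Int.toNat_natCast, hsegm _ hmlt hm]
    by_cases hveq : row[j.toNat] = x
    · simp [hveq]
    · simp only [hveq, if_false]
      by_cases hlt : x < row[j.toNat]
      · simp only [hlt, if_true]
        rw [ih ((j - 1) + 1 - lo).toNat (by omega) lo (j - 1) rfl hlo (by omega) (by omega)]
        congr 1
        simp only [hseg, List.take_take]
        congr 1
        rw [hm]; omega
      · simp only [hlt, if_false]
        rw [ih (hi + 1 - (j + 1)).toNat (by omega) (j + 1) hi rfl (by omega) (by omega) hhi]
        congr 1
        simp only [hseg, List.drop_take, List.drop_drop]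
        rw [hm]
        congr 1
        · omega
        · congr 1
          omega
  · simp only [h, dif_neg, not_false_iff]
    have : (hi + 1 - lo).toNat = 0 := by omega
    rw [this]
    simp [foundB]

theorem go_eq (c : Nat) (x : Int) (mat : List (List Int))
    (h : ∀ row ∈ mat, c ≤ row.length) :
    searchGoA c x mat = searchGoB c x mat := by
  induction mat with
  | nil => rfl
  | cons row rest ihm =>
    have hlen : c ≤ row.length := h row (List.mem_cons_self ..)
    have hb : pyBisect row x 0 ((c : Int) - 1) = foundB x (row.take c) := by
      rw [pyBisect_eq_foundB row x 0 ((c : Int) - 1) le_rfl (by omega) (by omega)]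
      congr 1
      simp only [Int.toNat_zero, List.drop_zero]
      congr 1
      omega
    simp only [searchGoA, searchGoB, hb]
    split
    · rfl
    · exact ihm (fun r hr => h r (List.mem_cons_of_mem _ hr))

-- ===== VERDICT (by name: the statement is the Claim_ definition above) =====
theorem searchRowMatrix_spec : Claim_equal_searchRowMatrix := by
  intro mat x _ hpre
  obtain ⟨hne, hrows⟩ := hpre
  unfold Spec_searchRowMatrix searchRowMatrix searchRowMatrix_alt
  obtain ⟨row0, rest, rfl⟩ := List.exists_cons_of_ne_nil hne
  rw [PySem.List.pyGet?_zero_cons]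
  exact go_eq row0.length x (row0 :: rest) (fun r hr => by simpa using hrows r hr)
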